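-- pv_equiv track=rewrite | github.com/RocketGod-git/Flipper_Zero | flipper_toolbox/subghz_create_dat.py | encode_touchtunes
-- ===== SOURCE A (Python) =====
-- def encode_touchtunes(command, pin=0x00):
--     # Syncword
--     frame = 0x5D
--
--     # PIN
--     for bit in range(8):
--         frame <<= 1
--         if pin & (1 << bit):
--             frame |= 1
--     # Insert button code and it's complement
--     frame <<= 16
--     frame |= (command << 8)
--     frame |= (command ^ 0xFF)
--
--     # Convert to raw signal
--     # 0 symble == 10 && 1 symble == 1000
--     ook = ""
--     for _i in range(8 + 8 + 16):
--         if frame & 0x80000000: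
--             ook += "1000"
--             frame <<= 1
--         else:
--             ook += "10"
--             frame <<= 1
--     return "1" * 16 + "0" * 8 + ook + "1000"
-- ===== SOURCE B (Python) =====
-- # Table-driven re-implementation: precomputed OOK-per-byte and bit-reversal tables
-- # built by doubling (DP), then four table lookups on the frame's bytes.
-- _OOK = ["10", "1000"]
-- for _ in range(3):
--     _OOK = [hi + lo for hi in _OOK for lo in _OOK]
-- _REV = [0, 1]
-- _n = 2
-- for _ in range(3):
--     _REV = [lo * _n + hi for hi in _REV for lo in _REV]
--     _n *= _n
--
--
-- def encode_touchtunes(command, pin=0x00):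
--     word = (((0x5D << 8) | _REV[pin % 256]) << 16 | (command << 8) | (command ^ 0xFF)) % 0x100000000
--     return ("1" * 16 + "0" * 8
--             + _OOK[word >> 24] + _OOK[word >> 16 & 0xFF]
--             + _OOK[word >> 8 & 0xFF] + _OOK[word & 0xFF] + "1000")
-- ===== Notes on version B (the rewrite author's own statement) =====
-- stated objective: alternative
-- what changed: B replaces A's per-bit loops (the 8-step pin bit-reversal loop and the 32-step MSB-test OOK emission loop) with precomputed lookup tables built once by doubling (a 256-entry byte->OOK-string table and a 256-entry byte bit-reversal table), so the function body is four table lookups on the frame's bytes with no bit loop.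
import Mathlib
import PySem

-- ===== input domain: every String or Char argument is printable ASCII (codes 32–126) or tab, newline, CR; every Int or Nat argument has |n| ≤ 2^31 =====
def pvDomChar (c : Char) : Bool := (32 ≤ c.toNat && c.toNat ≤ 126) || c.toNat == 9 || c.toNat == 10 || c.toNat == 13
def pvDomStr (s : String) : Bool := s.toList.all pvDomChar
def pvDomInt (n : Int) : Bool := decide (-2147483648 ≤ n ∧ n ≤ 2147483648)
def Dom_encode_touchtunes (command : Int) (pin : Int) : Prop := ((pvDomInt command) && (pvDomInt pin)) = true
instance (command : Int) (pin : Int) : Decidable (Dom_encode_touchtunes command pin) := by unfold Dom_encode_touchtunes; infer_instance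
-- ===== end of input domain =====

-- B replaces A's per-bit loops by two 256-entry lookup tables built once by doubling
-- (byte -> OOK symbol string, byte -> bit-reversed byte); same exact output.

-- ===== PORT A =====
-- the `for _i in range(8 + 8 + 16)` OOK emission loop; fuel = remaining iterations
def pvOokA : Nat → Int → List Char → List Char
  | 0, _, ook => ook
  | k+1, frame, ook =>
    if PySem.Int.band frame 2147483648 ≠ 0 then pvOokA k (frame <<< (1:Nat)) (ook ++ ['1','0','0','0'])
    else pvOokA k (frame <<< (1:Nat)) (ook ++ ['1','0'])

def encode_touchtunes (command : Int) (pin : Int) : String :=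
  -- frame = 0x5D; for bit in range(8): frame <<= 1; if pin & (1 << bit): frame |= 1
  let frame : Int := 93
  let frame := (List.range 8).foldl (fun (f : Int) (bit : Nat) =>
    let f := f <<< (1:Nat)
    if PySem.Int.band pin ((1:Int) <<< bit) ≠ 0 then PySem.Int.bor f 1 else f) frame
  -- frame <<= 16; frame |= (command << 8); frame |= (command ^ 0xFF)
  let frame := frame <<< (16:Nat)
  let frame := PySem.Int.bor frame (command <<< (8:Nat))
  let frame := PySem.Int.bor frame (PySem.Int.bxor command 255)
  String.ofList (List.replicate 16 '1' ++ List.replicate 8 '0' ++ pvOokA 32 frame [] ++ ['1','0','0','0'])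

-- ===== PORT B =====
-- _OOK = ["10","1000"]; for _ in range(3): _OOK = [hi + lo for hi in _OOK for lo in _OOK]
def pvOokTab : List (List Char) :=
  (List.range 3).foldl (fun T _ => T.flatMap (fun hi => T.map (fun lo => hi ++ lo)))
    [['1','0'], ['1','0','0','0']]

-- _REV = [0,1]; _n = 2; for _ in range(3): _REV = [lo*_n + hi for hi in _REV for lo in _REV]; _n *= _n
def pvRevTab : List Int :=
  ((List.range 3).foldl (fun (p : List Int × Int) _ =>
      (p.1.flatMap (fun hi => p.1.map (fun lo => lo * p.2 + hi)), p.2 * p.2)) ([0, 1], 2)).1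

def encode_touchtunes_alt (command : Int) (pin : Int) : String :=
  -- list indexing via pyGet?; all indices are provably in range, so the .getD default is never used
  let rev := (PySem.List.pyGet? pvRevTab (PySem.Int.mod pin 256)).getD 0
  let word := PySem.Int.mod
    (PySem.Int.bor (PySem.Int.bor ((PySem.Int.bor ((93:Int) <<< (8:Nat)) rev) <<< (16:Nat)) (command <<< (8:Nat)))
      (PySem.Int.bxor command 255)) 4294967296
  String.ofList (List.replicate 16 '1' ++ List.replicate 8 '0'
    ++ (PySem.List.pyGet? pvOokTab (word >>> (24:Nat))).getD []
    ++ (PySem.List.pyGet? pvOokTab (PySem.Int.band (word >>> (16:Nat)) 255)).getD []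
    ++ (PySem.List.pyGet? pvOokTab (PySem.Int.band (word >>> (8:Nat)) 255)).getD []
    ++ (PySem.List.pyGet? pvOokTab (PySem.Int.band word 255)).getD []
    ++ ['1','0','0','0'])

-- ===== PRECONDITION & SPEC =====
def Spec_encode_touchtunes (command : Int) (pin : Int) (out : String) : Prop := out = encode_touchtunes_alt command pin
instance (command : Int) (pin : Int) (out : String) : Decidable (Spec_encode_touchtunes command pin out) := by unfold Spec_encode_touchtunes; infer_instance

-- ===== CLAIM (what is proved, stated in full; the proofs are below) =====
def Claim_equal_encode_touchtunes : Prop := ∀ (command : Int) (pin : Int), Dom_encode_touchtunes command pin → Spec_encode_touchtunes command pin (encode_touchtunes command pin)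

-- ===== LEMMAS AND PROOFS =====

-- bit b of the infinite two's-complement expansion of x, read off x mod 2^(b+1)
def pvBit (x : Int) (b : Nat) : Bool := (x % ((2:Int)^(b+1))).toNat.testBit b

def pvSym (b : Bool) : List Char := if b then ['1','0','0','0'] else ['1','0']

lemma pvTopBit (v b : Nat) (h : v < 2^(b+1)) : v.testBit b = decide (2^b ≤ v) := by
  rw [Nat.testBit_eq_decide_div_mod_eq]
  have hp : 0 < 2^b := Nat.two_pow_pos b
  have h1 : v / 2^b < 2 := Nat.div_lt_of_lt_mul (by rw [pow_succ] at h; omega)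
  have h2 : (1 ≤ v / 2^b) ↔ 2^b ≤ v := Nat.one_le_div_iff hp
  have h3 : v / 2^b % 2 = v / 2^b := Nat.mod_eq_of_lt h1
  rw [h3]; simp only [decide_eq_decide]; omega

lemma pvBand_two_pow (x : Int) (b : Nat) :
    (PySem.Int.band x ((2:Int)^b) ≠ 0) ↔ pvBit x b = true := by
  have hcast : ((2:Int)^b) = ((2^b : Nat) : Int) := by push_cast; ring
  have hp : 0 < 2^b := Nat.two_pow_pos b
  cases x with
  | ofNat n =>
      have h1 : (Int.ofNat n) = ((n : Nat) : Int) := rfl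
      rw [h1, hcast, PySem.Int.band_natCast]
      have h2 : ((n:Int)) % ((2:Int)^(b+1)) = ((n % 2^(b+1) : Nat) : Int) := by push_cast; ring
      unfold pvBit
      rw [h2, Int.toNat_natCast, Nat.testBit_mod_two_pow, Nat.and_two_pow]
      simp
  | negSucc m =>
      have hneg : ¬ (0:Int) ≤ Int.negSucc m := by rw [Int.negSucc_eq]; omega
      have hb0 : (0:Int) ≤ (2:Int)^b := by positivity
      have hm1 : -(Int.negSucc m) - 1 = ((m : Nat) : Int) := by rw [Int.negSucc_eq]; ring
      have hval : PySem.Int.band (Int.negSucc m) ((2:Int)^b)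
          = ((2^b - (2^b &&& m) : Nat) : Int) := by
        have ht : ((2:Int)^b).toNat = 2^b := by rw [hcast]; exact Int.toNat_natCast _
        unfold PySem.Int.band
        rw [if_neg hneg, if_pos hb0, hm1, ht, Int.toNat_natCast]
      set M := 2^(b+1) with hM
      have hMpos : 0 < M := Nat.two_pow_pos (b+1)
      set r := m % M with hr
      have hrlt : r < M := Nat.mod_lt _ hMpos
      have hdm := Nat.div_add_mod m M
      have hMc : ((2:Int)^(b+1)) = ((M : Nat) : Int) := by rw [hM]; push_cast; ring
      have hdmI : ((M:Nat):Int) * ((m / M : Nat) : Int) + ((r:Nat):Int) = ((m:Nat):Int) := by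
        exact_mod_cast hdm
      have hkey : (Int.negSucc m) % ((2:Int)^(b+1)) = ((M - 1 - r : Nat) : Int) := by
        have hsplit : (Int.negSucc m)
            = ((M - 1 - r : Nat) : Int) + ((2:Int)^(b+1)) * (-((m / M : Nat) : Int) - 1) := by
          have hc1 : ((M - 1 - r : Nat) : Int) = ((M:Nat):Int) - 1 - ((r:Nat):Int) := by omega
          rw [Int.negSucc_eq, hMc, hc1]
          linear_combination hdmI
        rw [hsplit, Int.add_mul_emod_self_left]
        apply Int.emod_eq_of_lt
        · omega
        · rw [hMc]; omega
      unfold pvBit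
      rw [hkey, Int.toNat_natCast]
      rw [pvTopBit _ _ (by omega), hval]
      have htm : m.testBit b = r.testBit b := by
        rw [hr, hM, Nat.testBit_mod_two_pow]
        simp
      have htr : r.testBit b = decide (2^b ≤ r) := pvTopBit r b (by omega)
      have hand : 2^b &&& m = (if 2^b ≤ r then 2^b else 0) := by
        rw [Nat.land_comm, Nat.and_two_pow, htm, htr]
        by_cases hd : 2^b ≤ r <;> simp [hd]
      by_cases hd : 2^b ≤ r
      · have h0 : 2^b &&& m = 2^b := by rw [hand, if_pos hd]
        rw [h0]
        simp
        omega
      · have h0 : 2^b &&& m = 0 := by rw [hand, if_neg hd]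
        rw [h0]
        simp
        omega

lemma pvBit_double (x : Int) (b : Nat) : pvBit (2 * x) (b + 1) = pvBit x b := by
  unfold pvBit
  have h2 : ((2:Int)^(b+1+1)) = 2 * 2^(b+1) := by ring
  rw [h2, Int.mul_emod_mul_of_pos _ _ (by norm_num : (0:Int) < 2)]
  have hnn : 0 ≤ x % 2^(b+1) := Int.emod_nonneg _ (by positivity)
  have h3 : (2 * (x % 2^(b+1))).toNat = 2 * (x % 2^(b+1)).toNat := by omega
  rw [h3, Nat.testBit_succ, Nat.mul_div_cancel_left _ (by norm_num)]

lemma pvBit_of_emod_pow (x : Int) (b k : Nat) (hbk : b < k) :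
    ((x % ((2:Int)^k)).toNat).testBit b = pvBit x b := by
  unfold pvBit
  rw [← Int.emod_emod_of_dvd x (pow_dvd_pow (2:Int) (by omega : b + 1 ≤ k))]
  have hnn : 0 ≤ x % (2:Int)^k := Int.emod_nonneg _ (by positivity)
  have h1 : x % (2:Int)^k % (2:Int)^(b+1) = (((x % (2:Int)^k).toNat % 2^(b+1) : Nat) : Int) := by
    conv_lhs => rw [show x % (2:Int)^k = (((x % (2:Int)^k).toNat : Nat) : Int) by omega]
    push_cast
    ring_nf
  rw [h1, Int.toNat_natCast, Nat.testBit_mod_two_pow]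
  simp

lemma pvShift1 (x : Int) : x <<< (1:Nat) = 2 * x := by rw [Int.shiftLeft_eq]; ring

lemma pvOokA_eq (k : Nat) : ∀ (x : Int) (acc : List Char), k ≤ 32 →
    pvOokA k x acc = acc ++ (List.range k).flatMap (fun i => pvSym (pvBit x (31 - i))) := by
  induction k with
  | zero => intro x acc _; simp [pvOokA]
  | succ k ih =>
    intro x acc hk
    have hb := pvBand_two_pow x 31
    have h31 : (2147483648:Int) = 2^31 := by norm_num
    rw [← h31] at hb
    have htail : (List.range k).flatMap (fun i => pvSym (pvBit (x <<< (1:Nat)) (31 - i)))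
        = (List.range k).flatMap (fun i => pvSym (pvBit x (31 - (i+1)))) := by
      apply List.flatMap_congr
      intro i hi
      have hik : i < k := List.mem_range.mp hi
      have h1 : 31 - i = (31 - (i+1)) + 1 := by omega
      rw [pvShift1, h1, pvBit_double]
    rw [List.range_succ_eq_map, List.flatMap_cons, List.flatMap_map]
    by_cases hc : PySem.Int.band x 2147483648 ≠ 0
    · have hbt : pvBit x 31 = true := hb.mp hc
      rw [show pvOokA (k+1) x acc
            = pvOokA k (x <<< (1:Nat)) (acc ++ ['1','0','0','0']) by simp [pvOokA, hc]]
      rw [ih _ _ (by omega), htail]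
      simp [pvSym, hbt]
    · have hbt : pvBit x 31 = false := by
        cases hbf : pvBit x 31
        · rfl
        · exact absurd (hb.mpr hbf) hc
      rw [show pvOokA (k+1) x acc
            = pvOokA k (x <<< (1:Nat)) (acc ++ ['1','0']) by simp [pvOokA, hc]]
      rw [ih _ _ (by omega), htail]
      simp [pvSym, hbt]

-- the pin fold equals the sync byte joined with the reversal-table entry (byte-level fact, decided)
set_option maxRecDepth 100000 in
lemma pvPinDec : ∀ n : Fin 256,
    (List.range 8).foldl (fun (f : Int) (bit : Nat) =>
      let f := f <<< (1:Nat)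
      if (n:Nat).testBit bit then PySem.Int.bor f 1 else f) 93
    = PySem.Int.bor ((93:Int) <<< (8:Nat))
        ((PySem.List.pyGet? pvRevTab ((n:Nat):Int)).getD 0) := by
  decide

lemma pvPin (pin : Int) :
    (List.range 8).foldl (fun (f : Int) (bit : Nat) =>
      let f := f <<< (1:Nat)
      if PySem.Int.band pin ((1:Int) <<< bit) ≠ 0 then PySem.Int.bor f 1 else f) 93
    = PySem.Int.bor ((93:Int) <<< (8:Nat))
        ((PySem.List.pyGet? pvRevTab (PySem.Int.mod pin 256)).getD 0) := by
  have hmpos : (0:Int) < 256 := by norm_num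
  have hnn := PySem.Int.mod_nonneg pin hmpos
  have hlt := PySem.Int.mod_lt pin hmpos
  set n := (PySem.Int.mod pin 256).toNat with hn
  have hn256 : n < 256 := by omega
  have hmn : PySem.Int.mod pin 256 = ((n:Nat):Int) := by omega
  have hcongr : (List.range 8).foldl (fun (f : Int) (bit : Nat) =>
      let f := f <<< (1:Nat)
      if PySem.Int.band pin ((1:Int) <<< bit) ≠ 0 then PySem.Int.bor f 1 else f) 93
    = (List.range 8).foldl (fun (f : Int) (bit : Nat) =>
      let f := f <<< (1:Nat)
      if n.testBit bit then PySem.Int.bor f 1 else f) 93 := by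
    apply PySem.List.foldl_congr_mem
    intro acc x hx
    have hx8 : x < 8 := List.mem_range.mp hx
    have hiff : (PySem.Int.band pin ((1:Int) <<< x) ≠ 0) ↔ n.testBit x = true := by
      have hsh : ((1:Int) <<< x) = (2:Int)^x := by rw [Int.shiftLeft_eq]; ring
      rw [hsh, pvBand_two_pow]
      rw [← pvBit_of_emod_pow pin x 8 hx8]
      rw [hn, PySem.Int.mod_eq_emod_of_pos hmpos, (by norm_num : ((256:Int)) = (2:Int)^8)]
    by_cases hc : n.testBit x
    · simp only [if_pos (hiff.mpr hc), if_pos hc]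
    · simp only [if_neg (fun hh => hc (hiff.mp hh)), if_neg hc]
  rw [hcongr, hmn]
  exact pvPinDec ⟨n, hn256⟩

-- an OOK-table entry is the 8 MSB-first symbols of its (byte) index (decided)
set_option maxRecDepth 1000000 in
lemma pvOokTabDec : ∀ n : Fin 256,
    (PySem.List.pyGet? pvOokTab ((n:Nat):Int)).getD []
      = (List.range 8).flatMap (fun i => pvSym ((n:Nat).testBit (7 - i))) := by
  decide

-- ===== VERDICT (by name: the statement is the Claim_ definition above) =====
theorem encode_touchtunes_spec : Claim_equal_encode_touchtunes := by
  unfold Claim_equal_encode_touchtunes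
  intro command pin _hdom
  unfold Spec_encode_touchtunes encode_touchtunes encode_touchtunes_alt
  dsimp only
  rw [pvPin pin]
  set rev := (PySem.List.pyGet? pvRevTab (PySem.Int.mod pin 256)).getD 0 with hrev
  set F := PySem.Int.bor (PySem.Int.bor ((PySem.Int.bor ((93:Int) <<< (8:Nat)) rev) <<< (16:Nat)) (command <<< (8:Nat))) (PySem.Int.bxor command 255) with hF
  have hword : PySem.Int.mod F 4294967296 = F % (2:Int)^32 := by
    rw [PySem.Int.mod_eq_emod_of_pos (by norm_num)]; norm_num
  set w := (F % ((2:Int)^32)).toNat with hw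
  have hnn : 0 ≤ F % (2:Int)^32 := Int.emod_nonneg _ (by positivity)
  have hltF : F % (2:Int)^32 < (2:Int)^32 := Int.emod_lt_of_pos _ (by positivity)
  have hwlt : w < 2^32 := by
    have h2 : ((2:Int)^32) = ((2^32 : Nat) : Int) := by norm_num
    omega
  have hcastw : PySem.Int.mod F 4294967296 = ((w:Nat):Int) := by rw [hword]; omega
  rw [hcastw]
  -- the four bytes of w
  have hb3 : ((w:Nat):Int) >>> (24:Nat) = (((w >>> 24 : Nat)):Int) := by
    simp [Int.natCast_shiftRight]
  have hmask : ∀ s : Nat, PySem.Int.band (((w >>> s : Nat)):Int) 255 = (((w >>> s) &&& 255 : Nat) : Int) := by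
    intro s
    exact_mod_cast PySem.Int.band_natCast (w >>> s) 255
  have hb0 : PySem.Int.band ((w:Nat):Int) 255 = ((w &&& 255 : Nat) : Int) := by
    exact_mod_cast PySem.Int.band_natCast w 255
  have hbyte : ∀ s : Nat, (w >>> s) &&& 255 < 256 := by
    intro s
    have := Nat.and_le_right (n := w >>> s) (m := 255)
    omega
  have hb3lt : w >>> 24 < 256 := by
    have : w >>> 24 = w / 2^24 := Nat.shiftRight_eq_div_pow w 24
    rw [this]
    omega
  -- per-chunk testBit transport
  have htb : ∀ s i : Nat, i < 8 → ((w >>> s) &&& 255).testBit (7 - i) = w.testBit (s + (7 - i)) := by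
    intro s i hi
    have h7 : 7 - i < 8 := by omega
    rw [Nat.testBit_and, show (255:Nat) = 2^8 - 1 by norm_num,
        Nat.testBit_two_pow_sub_one, Nat.testBit_shiftRight]
    simp [h7]
  have htb3 : ∀ i : Nat, i < 8 → (w >>> 24).testBit (7 - i) = w.testBit (24 + (7 - i)) := by
    intro i hi
    rw [Nat.testBit_shiftRight]
  -- expand A's emission loop and split into four byte chunks
  rw [pvOokA_eq 32 F [] (le_refl 32)]
  simp only [List.nil_append]
  have hsplit : List.range 32 = List.range 8 ++ ((List.range 8).map (· + 8))
      ++ ((List.range 8).map (· + 16)) ++ ((List.range 8).map (· + 24)) := by decide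
  rw [hsplit]
  simp only [List.flatMap_append, List.flatMap_map]
  rw [hb3,
      show ((w:Nat):Int) >>> (16:Nat) = (((w >>> 16 : Nat)):Int) by simp [Int.natCast_shiftRight],
      show ((w:Nat):Int) >>> (8:Nat) = (((w >>> 8 : Nat)):Int) by simp [Int.natCast_shiftRight],
      hmask 16, hmask 8, hb0]
  rw [pvOokTabDec ⟨w >>> 24, hb3lt⟩, pvOokTabDec ⟨(w >>> 16) &&& 255, hbyte 16⟩,
      pvOokTabDec ⟨(w >>> 8) &&& 255, hbyte 8⟩]
  have hb0' : (w &&& 255 : Nat) = (w >>> 0) &&& 255 := by simp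
  rw [show ((w &&& 255 : Nat) : Int) = (((w >>> 0) &&& 255 : Nat) : Int) by rw [← hb0'],
      pvOokTabDec ⟨(w >>> 0) &&& 255, hbyte 0⟩]
  have hbitw : ∀ b : Nat, b < 32 → w.testBit b = pvBit F b := by
    intro b hb
    rw [hw]
    exact pvBit_of_emod_pow F b 32 hb
  have hc3 : (List.range 8).flatMap (fun i => pvSym (pvBit F (31 - i)))
      = (List.range 8).flatMap (fun i => pvSym ((w >>> 24).testBit (7 - i))) := by
    apply List.flatMap_congr
    intro i hi
    have hi8 : i < 8 := List.mem_range.mp hi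
    rw [htb3 i hi8, hbitw (24 + (7 - i)) (by omega)]
    congr 2
    omega
  have hc2 : (List.range 8).flatMap (fun a => pvSym (pvBit F (31 - (a + 8))))
      = (List.range 8).flatMap (fun i => pvSym (((w >>> 16) &&& 255).testBit (7 - i))) := by
    apply List.flatMap_congr
    intro i hi
    have hi8 : i < 8 := List.mem_range.mp hi
    rw [htb 16 i hi8, hbitw (16 + (7 - i)) (by omega)]
    congr 2
    omega
  have hc1 : (List.range 8).flatMap (fun a => pvSym (pvBit F (31 - (a + 16))))
      = (List.range 8).flatMap (fun i => pvSym (((w >>> 8) &&& 255).testBit (7 - i))) := by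
    apply List.flatMap_congr
    intro i hi
    have hi8 : i < 8 := List.mem_range.mp hi
    rw [htb 8 i hi8, hbitw (8 + (7 - i)) (by omega)]
    congr 2
    omega
  have hc0 : (List.range 8).flatMap (fun a => pvSym (pvBit F (31 - (a + 24))))
      = (List.range 8).flatMap (fun i => pvSym (((w >>> 0) &&& 255).testBit (7 - i))) := by
    apply List.flatMap_congr
    intro i hi
    have hi8 : i < 8 := List.mem_range.mp hi
    rw [htb 0 i hi8, hbitw (0 + (7 - i)) (by omega)]
    congr 2
    omega
  rw [hc3, hc2, hc1, hc0]
  simp [List.append_assoc]
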